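-- pv_equiv track=rewrite | github.com/pypi-data/pypi-mirror-398 | packages/grew-tse/grew_tse-0.1.3.tar.gz/grew_tse-0.1.3/src/grewtse/preprocessing/reconstruction.py | recursive_match_token
-- ===== SOURCE A (Python) =====
-- def recursive_match_token(
--     full_sentence: str,
--     token_list: list[str],
--     token_list_mask_index: int,
--     skippable_tokens: list[str],
-- ) -> int:
--     # ensure we can retrieve another token
--     n_remaining_tokens = len(token_list)
--     if n_remaining_tokens == 0:
--         raise ValueError(
--             "Mask index not reached but token list has been iterated for sentence: {}".format(
--                 full_sentence
--             )
--         )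
--     t = token_list[0]
--
--     # returns the index of the first occurrence
--     # of the token t
--     match_index = full_sentence.find(t)
--     is_match_found = match_index != -1
--     has_reached_mask_token = token_list_mask_index == 0
--
--     # BASE CASE
--     if has_reached_mask_token and is_match_found:
--         # we're at the end
--         return match_index
--     # RECURSIVE CASE
--     elif is_match_found:
--         sliced_sentence = full_sentence[match_index + len(t) :]
--         token_list.pop(0)
--
--         return (
--             match_index
--             + len(t)
--             + recursive_match_token(
--                 sliced_sentence,
--                 token_list,
--                 token_list_mask_index - 1,
--                 skippable_tokens,
--             )
--         )
--     else:
--         # no match found, is t irrelevant?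
--         if t in skippable_tokens:
--             # need to watch out with the slicing here
--             # tests are important
--             sliced_sentence = full_sentence[len(t) - 1 :]
--             token_list.pop(0)
--             return recursive_match_token(
--                 sliced_sentence,
--                 token_list,
--                 token_list_mask_index - 1,
--                 skippable_tokens,
--             )
--         else:
--             raise ValueError(
--                 "Token not found in string nor has it been specified as skippable: {}".format(
--                     t
--                 )
--             )
-- ===== SOURCE B (Python) =====
-- def recursive_match_token(
--     full_sentence: str,
--     token_list: list[str],
--     token_list_mask_index: int,
--     skippable_tokens: list[str],
-- ) -> int:
--     # Iterative version: walk the token list keeping an offset accumulator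
--     # and a shrinking working sentence instead of recursing.
--     offset = 0
--     sentence = full_sentence
--     while True:
--         if len(token_list) == 0:
--             raise ValueError(
--                 "Mask index not reached but token list has been iterated for sentence: {}".format(
--                     sentence
--                 )
--             )
--         t = token_list[0]
--         match_index = sentence.find(t)
--         if token_list_mask_index == 0 and match_index != -1:
--             return offset + match_index
--         elif match_index != -1:
--             offset += match_index + len(t)
--             sentence = sentence[match_index + len(t):]
--             token_list.pop(0)
--             token_list_mask_index -= 1
--         elif t in skippable_tokens:
--             sentence = sentence[len(t) - 1:]
--             token_list.pop(0)
--             token_list_mask_index -= 1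
--         else:
--             raise ValueError(
--                 "Token not found in string nor has it been specified as skippable: {}".format(
--                     t
--                 )
--             )
-- ===== Notes on version B (the rewrite author's own statement) =====
-- stated objective: idiomatic
-- what changed: A's plain recursion that assembles the offset on the way back up is rewritten as a single iterative while-loop carrying an explicit offset accumulator and a shrinking working sentence.
import Mathlib
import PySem

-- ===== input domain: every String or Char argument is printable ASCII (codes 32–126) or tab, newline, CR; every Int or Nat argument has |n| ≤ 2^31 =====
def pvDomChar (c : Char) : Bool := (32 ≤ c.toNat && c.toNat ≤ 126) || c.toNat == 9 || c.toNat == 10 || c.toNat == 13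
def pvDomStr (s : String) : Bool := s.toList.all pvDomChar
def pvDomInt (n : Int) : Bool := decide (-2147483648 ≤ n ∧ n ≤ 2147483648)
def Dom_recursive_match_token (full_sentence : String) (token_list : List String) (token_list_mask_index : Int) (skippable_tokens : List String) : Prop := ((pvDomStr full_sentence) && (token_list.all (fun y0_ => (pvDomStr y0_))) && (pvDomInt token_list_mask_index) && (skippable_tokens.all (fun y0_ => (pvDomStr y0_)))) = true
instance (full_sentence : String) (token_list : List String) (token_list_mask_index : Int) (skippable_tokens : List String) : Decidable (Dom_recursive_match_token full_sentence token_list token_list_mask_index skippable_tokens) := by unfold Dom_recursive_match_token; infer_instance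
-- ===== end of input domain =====

-- B rewrites A's plain recursion (result assembled on the way back up) as an
-- iterative accumulator loop over the token list (objective: idiomatic/simpler).
-- A mutates token_list (pop(0)); B performs the same mutation; the equivalence
-- proved here is about the return value.

-- ===== PORT A =====  (literal port; Python raises ValueError where this returns 0 — excluded by Pre_)
def recursive_match_token (full_sentence : String) (token_list : List String) (token_list_mask_index : Int) (skippable_tokens : List String) : Int :=
  match token_list with
  | [] => 0  -- raise ValueError("Mask index not reached …")
  | t :: rest =>
      let match_index : Int := PySem.Str.find full_sentence t
      let is_match_found : Bool := match_index != -1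
      let has_reached_mask_token : Bool := token_list_mask_index == 0
      if has_reached_mask_token && is_match_found then
        match_index
      else if is_match_found then
        let sliced_sentence := PySem.Str.slice full_sentence (some (match_index + (t.length : Int))) none
        match_index + (t.length : Int) +
          recursive_match_token sliced_sentence rest (token_list_mask_index - 1) skippable_tokens
      else if t ∈ skippable_tokens then
        let sliced_sentence := PySem.Str.slice full_sentence (some ((t.length : Int) - 1)) none
        recursive_match_token sliced_sentence rest (token_list_mask_index - 1) skippable_tokens
      else 0  -- raise ValueError("Token not found …")

-- ===== PORT B =====  (Source B's while-loop: state = (sentence, token_list, mask_index, offset))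
def pvAltLoop (sentence : String) (token_list : List String) (token_list_mask_index : Int) (skippable_tokens : List String) (offset : Int) : Int :=
  match token_list with
  | [] => 0  -- raise ValueError("Mask index not reached …")
  | t :: rest =>
      let match_index : Int := PySem.Str.find sentence t
      if token_list_mask_index == 0 && match_index != -1 then
        offset + match_index
      else if match_index != -1 then
        pvAltLoop (PySem.Str.slice sentence (some (match_index + (t.length : Int))) none) rest
          (token_list_mask_index - 1) skippable_tokens (offset + match_index + (t.length : Int))
      else if t ∈ skippable_tokens then
        pvAltLoop (PySem.Str.slice sentence (some ((t.length : Int) - 1)) none) rest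
          (token_list_mask_index - 1) skippable_tokens offset
      else 0  -- raise ValueError("Token not found …")

def recursive_match_token_alt (full_sentence : String) (token_list : List String) (token_list_mask_index : Int) (skippable_tokens : List String) : Int :=
  pvAltLoop full_sentence token_list token_list_mask_index skippable_tokens 0

-- ===== PRECONDITION & SPEC =====
-- Pre_ holds exactly on the inputs where Python A returns normally (A raises a
-- ValueError otherwise: token list exhausted, or a non-skippable token not found).
-- Whether A returns depends on the data-dependent sequence of find results, so
-- the condition is stated by structural recursion on the token list.
def pvPreRec (sentence : String) (token_list : List String) (token_list_mask_index : Int) (skippable_tokens : List String) : Bool :=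
  match token_list with
  | [] => false
  | t :: rest =>
      let match_index : Int := PySem.Str.find sentence t
      if token_list_mask_index == 0 && match_index != -1 then true
      else if match_index != -1 then
        pvPreRec (PySem.Str.slice sentence (some (match_index + (t.length : Int))) none) rest
          (token_list_mask_index - 1) skippable_tokens
      else if t ∈ skippable_tokens then
        pvPreRec (PySem.Str.slice sentence (some ((t.length : Int) - 1)) none) rest
          (token_list_mask_index - 1) skippable_tokens
      else false

def Pre_recursive_match_token (full_sentence : String) (token_list : List String) (token_list_mask_index : Int) (skippable_tokens : List String) : Prop :=
  pvPreRec full_sentence token_list token_list_mask_index skippable_tokens = true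
instance (full_sentence : String) (token_list : List String) (token_list_mask_index : Int) (skippable_tokens : List String) : Decidable (Pre_recursive_match_token full_sentence token_list token_list_mask_index skippable_tokens) := by unfold Pre_recursive_match_token; infer_instance

def pvWitness_recursive_match_token : String × List String × Int × List String := ("a b", ["a", "b"], 1, [])

def Spec_recursive_match_token (full_sentence : String) (token_list : List String) (token_list_mask_index : Int) (skippable_tokens : List String) (out : Int) : Prop := out = recursive_match_token_alt full_sentence token_list token_list_mask_index skippable_tokens
instance (full_sentence : String) (token_list : List String) (token_list_mask_index : Int) (skippable_tokens : List String) (out : Int) : Decidable (Spec_recursive_match_token full_sentence token_list token_list_mask_index skippable_tokens out) := by unfold Spec_recursive_match_token; infer_instance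

-- ===== CLAIM (what is proved, stated in full; the proofs are below) =====
def Claim_equal_recursive_match_token : Prop := ∀ (full_sentence : String) (token_list : List String) (token_list_mask_index : Int) (skippable_tokens : List String), Dom_recursive_match_token full_sentence token_list token_list_mask_index skippable_tokens → Pre_recursive_match_token full_sentence token_list token_list_mask_index skippable_tokens → Spec_recursive_match_token full_sentence token_list token_list_mask_index skippable_tokens (recursive_match_token full_sentence token_list token_list_mask_index skippable_tokens)

-- ===== LEMMAS AND PROOFS =====

-- Loop invariant: on any input accepted by Pre_, the accumulator loop computes
-- offset + (A's recursive result).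
theorem pvAltLoop_eq (token_list : List String) :
    ∀ (sentence : String) (m : Int) (skippable_tokens : List String) (offset : Int),
      pvPreRec sentence token_list m skippable_tokens = true →
      pvAltLoop sentence token_list m skippable_tokens offset =
        offset + recursive_match_token sentence token_list m skippable_tokens := by
  induction token_list with
  | nil => intro s m sk off h; simp [pvPreRec] at h
  | cons t rest ih =>
      intro s m sk off h
      simp only [pvPreRec] at h
      simp only [pvAltLoop, recursive_match_token]
      split_ifs at h ⊢ with h1 h2 h3 <;>
        simp_all [Int.add_assoc]

theorem recursive_match_token_spec : Claim_equal_recursive_match_token := by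
  intro fs tl m sk _ hpre
  unfold Spec_recursive_match_token recursive_match_token_alt
  rw [pvAltLoop_eq tl fs m sk 0 hpre, Int.zero_add]
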